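-- pv_equiv track=rewrite | github.com/neilstudd/advent-of-code | 2025/day02/day02.py | split_id_into_sequences
-- ===== SOURCE A (Python) =====
-- def split_id_into_sequences(id):
--     value_to_str = str(id)
--     str_length = len(value_to_str)
--     results = []
--     for k in range(1, (str_length // 2) + 1):
--         if str_length % k == 0:
--             parts = []
--             for i in range(0, str_length, k):
--                 chunk = int(value_to_str[i : i + k])
--                 parts.append(chunk)
--             results.append(parts)
--     return results
-- ===== SOURCE B (Python) =====
-- def split_id_into_sequences(id):
--     value_to_str = str(id)
--     n = len(value_to_str)
--     divs = set()
--     d = 1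
--     while d * d <= n:
--         if n % d == 0:
--             divs.add(d)
--             divs.add(n // d)
--         d += 1
--     results = []
--     for k in sorted(x for x in divs if x != n):
--         results.append([int(value_to_str[i:i + k]) for i in range(0, n, k)])
--     return results
-- ===== Notes on version B (the rewrite author's own statement) =====
-- stated objective: alternative
-- what changed: B finds the valid chunk sizes by trial division up to sqrt(len) collecting divisor pairs {d, n//d} in a set, drops len itself and sorts, instead of A's linear scan of every candidate size up to half the digit count; the chunking itself is a per-k slice comprehension.
import Mathlib
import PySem

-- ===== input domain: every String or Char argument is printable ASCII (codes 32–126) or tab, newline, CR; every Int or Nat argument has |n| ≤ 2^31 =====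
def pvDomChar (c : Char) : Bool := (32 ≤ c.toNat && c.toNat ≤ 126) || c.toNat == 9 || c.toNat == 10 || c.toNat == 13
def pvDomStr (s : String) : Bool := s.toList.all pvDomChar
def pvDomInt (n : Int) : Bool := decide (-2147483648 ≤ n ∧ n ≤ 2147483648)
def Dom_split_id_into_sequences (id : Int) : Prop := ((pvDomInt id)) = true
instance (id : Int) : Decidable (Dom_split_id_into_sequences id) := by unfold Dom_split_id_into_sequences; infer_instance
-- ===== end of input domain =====

-- B finds the valid chunk sizes by trial division up to sqrt(len) instead of scanning all of 1..len//2 (objective: alternative; same return value).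

-- ===== PORT A =====
-- str(id) is ported on the List Char side (PySem.Int.toChars = (PySem.Int.toStr id).toList).
-- int(chunk) is PySem.Int.ofChars?; under Pre_ (0 ≤ id) the string is all digits, so none (ValueError) is unreachable and .getD 0 is never taken.
def split_id_into_sequences (id : Int) : List (List Int) :=
  let value_to_str : List Char := PySem.Int.toChars id
  let str_length : Int := (value_to_str.length : Int)
  (PySem.List.pyRange 1 (PySem.Int.floordiv str_length 2 + 1) 1).foldl
    (fun results k =>
      if PySem.Int.mod str_length k == 0 then
        results ++ [(PySem.List.pyRange 0 str_length k).foldl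
          (fun parts i =>
            parts ++ [(PySem.Int.ofChars? (PySem.List.slice value_to_str (some i) (some (i + k)))).getD 0]) []]
      else results) []

-- ===== PORT B =====
-- the 'while d * d <= n: …; d += 1' loop of Source B, ported with a fuel counter for structural
-- termination; fuel = n.toNat + 1 never runs out before the guard d*d <= n fails (d starts at 1).
def pvDivLoop (n : Int) (fuel : Nat) (d : Int) (divs : PySem.Set Int) : PySem.Set Int :=
  match fuel with
  | 0 => divs
  | fuel + 1 =>
    if d * d ≤ n then
      pvDivLoop n fuel (d + 1)
        (if PySem.Int.mod n d == 0 then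
          PySem.Set.add (PySem.Set.add divs d) (PySem.Int.floordiv n d)
        else divs)
    else divs

def split_id_into_sequences_alt (id : Int) : List (List Int) :=
  let value_to_str : List Char := PySem.Int.toChars id
  let n : Int := (value_to_str.length : Int)
  let divs : PySem.Set Int := pvDivLoop n (n.toNat + 1) 1 PySem.Set.empty
  (PySem.List.sorted (divs.filter (fun x => x != n)) (fun x => x) false).map
    (fun k => (PySem.List.pyRange 0 n k).map
      (fun i => (PySem.Int.ofChars? (PySem.List.slice value_to_str (some i) (some (i + k)))).getD 0))

-- ===== PRECONDITION & SPEC =====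
-- Pre_ excludes negative ids: there str(id) starts with '-', the single-character pass slices out the bare
-- chunk '-', and int('-') raises ValueError in A (B raises the same way); A returns on every nonnegative id.
def Pre_split_id_into_sequences (id : Int) : Prop := 0 ≤ id
instance (id : Int) : Decidable (Pre_split_id_into_sequences id) := by unfold Pre_split_id_into_sequences; infer_instance
def pvWitness_split_id_into_sequences : Int := (123456)
def Spec_split_id_into_sequences (id : Int) (out : List (List Int)) : Prop := out = split_id_into_sequences_alt id
instance (id : Int) (out : List (List Int)) : Decidable (Spec_split_id_into_sequences id out) := by unfold Spec_split_id_into_sequences; infer_instance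

-- ===== CLAIM (what is proved, stated in full; the proofs are below) =====
def Claim_equal_split_id_into_sequences : Prop := ∀ (id : Int), Dom_split_id_into_sequences id → Pre_split_id_into_sequences id → Spec_split_id_into_sequences id (split_id_into_sequences id)

-- ===== LEMMAS AND PROOFS =====

-- A's list of admitted chunk sizes, as a function of the digit-string length
def pvKlistA (n : Int) : List Int :=
  (PySem.List.pyRange 1 (PySem.Int.floordiv n 2 + 1) 1).filter (fun k => PySem.Int.mod n k == 0)

-- B's list of chunk sizes, as a function of the digit-string length
def pvKlistB (n : Int) : List Int :=
  PySem.List.sorted ((pvDivLoop n (n.toNat + 1) 1 PySem.Set.empty).filter (fun x => x != n)) (fun x => x) false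

-- one partition of the digit string into k-length int chunks (shared shape of both inner loops)
def pvParts (s : List Char) (k : Int) : List Int :=
  (PySem.List.pyRange 0 (s.length : Int) k).map
    (fun i => (PySem.Int.ofChars? (PySem.List.slice s (some i) (some (i + k)))).getD 0)

lemma pvKlist_eq : ∀ m : Nat, m ≤ 10 → pvKlistB (m : Int) = pvKlistA (m : Int) := by
  intro m hm
  interval_cases m <;> decide

lemma pvLen_le (id : Int) (h0 : 0 ≤ id) (h : id ≤ 2147483648) :
    (PySem.Int.toChars id).length ≤ 10 := by
  have hne : ¬ id < 0 := by omega
  have h1 : id.toNat < 10000000000 := by omega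
  have h2 : id.toNat < 10 ^ 10 := by
    calc id.toNat < 10000000000 := h1
      _ = 10 ^ 10 := by norm_num
  simpa [PySem.Int.toChars, hne] using Nat.toDigits_length 10 id.toNat 10 (by norm_num) h2

lemma pvPortA_eq (id : Int) :
    split_id_into_sequences id
      = (pvKlistA ((PySem.Int.toChars id).length : Int)).map (fun k => pvParts (PySem.Int.toChars id) k) := by
  simp only [split_id_into_sequences, pvKlistA, pvParts,
    PySem.List.foldl_append_if, PySem.List.foldl_append_singleton_eq_map, List.nil_append]

lemma pvPortB_eq (id : Int) :
    split_id_into_sequences_alt id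
      = (pvKlistB ((PySem.Int.toChars id).length : Int)).map (fun k => pvParts (PySem.Int.toChars id) k) := by
  simp only [split_id_into_sequences_alt, pvKlistB, pvParts]

-- ===== VERDICT (by name: the statement is the Claim_ definition above) =====
theorem split_id_into_sequences_spec : Claim_equal_split_id_into_sequences := by
  intro id hdom hpre
  have hdom' : id ≤ 2147483648 := by
    have := of_decide_eq_true hdom
    omega
  have hlen : (PySem.Int.toChars id).length ≤ 10 := pvLen_le id hpre hdom'
  show split_id_into_sequences id = split_id_into_sequences_alt id
  rw [pvPortA_eq, pvPortB_eq, pvKlist_eq _ hlen]
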